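-- pv_equiv track=rewrite | github.com/MrBrantCode/unitest_baseline | mut_generate/mist_train_cf/cf_44097/solution.py | complex_encode
-- ===== SOURCE A (Python) =====
-- def complex_encode(s, n):
--     if len(s) == 0:
--         return s
--     else:
--         new_char = s[0]
--         if new_char.isalpha():
--             ascii_offset = ord('A') if new_char.isupper() else ord('a')
--             new_char = chr(((ord(new_char) - ascii_offset + n) % 26) + ascii_offset)
--         elif new_char.isdigit():
--             new_char = str((int(new_char) + n) % 10)
--         return new_char + complex_encode(s[1:], n)
-- ===== SOURCE B (Python) =====
-- def complex_encode(s, n):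
--     out = []
--     for c in s:
--         o = ord(c)
--         if 65 <= o <= 90:
--             out.append(chr(65 + (o - 65 + n) % 26))
--         elif 97 <= o <= 122:
--             out.append(chr(97 + (o - 97 + n) % 26))
--         elif 48 <= o <= 57:
--             out.append(chr(48 + (o - 48 + n) % 10))
--         else:
--             out.append(c)
--     return ''.join(out)
-- ===== Notes on version B (the rewrite author's own statement) =====
-- stated objective: faster
-- what changed: Replaced the tail recursion on string slices (each step copies the rest of the string, O(n^2) total) and its isalpha/isdigit/int/str character tests by a single flat loop over code points using ord-range arithmetic, accumulating into a list and joining once.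
import Mathlib
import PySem

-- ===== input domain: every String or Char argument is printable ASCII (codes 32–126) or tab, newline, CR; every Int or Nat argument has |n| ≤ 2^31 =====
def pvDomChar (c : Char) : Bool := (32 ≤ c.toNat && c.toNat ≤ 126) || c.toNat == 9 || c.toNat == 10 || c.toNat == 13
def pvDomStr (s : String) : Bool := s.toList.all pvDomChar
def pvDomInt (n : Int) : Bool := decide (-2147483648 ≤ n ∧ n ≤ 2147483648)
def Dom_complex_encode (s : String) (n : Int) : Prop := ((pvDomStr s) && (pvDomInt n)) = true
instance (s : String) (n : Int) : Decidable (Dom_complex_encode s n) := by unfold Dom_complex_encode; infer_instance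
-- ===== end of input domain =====

-- B replaces A's tail recursion on string slices (quadratic copying) and its isalpha/isdigit/int/str
-- tests by one flat loop over code points with ord-range arithmetic, accumulating a list; objective: faster.

-- ===== PORT A =====
-- A's recursion on s[1:] ported as structural recursion on the character list;
-- int(c) on a char with isdigit = true is exactly c.toNat - 48 (ASCII digit).
def complexEncodeA (n : Int) : List Char → List Char
  | [] => []
  | c :: rest =>
    let piece : List Char :=
      if PySem.Chars.isalpha c then
        let off : Int := if PySem.Chars.isupper c then 65 else 97
        [Char.ofNat ((PySem.Int.mod ((c.toNat : Int) - off + n) 26) + off).toNat]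
      else if PySem.Chars.isdigit c then
        PySem.Int.toChars (PySem.Int.mod (((c.toNat : Int) - 48) + n) 10)
      else [c]
    piece ++ complexEncodeA n rest

def complex_encode (s : String) (n : Int) : String := String.mk (complexEncodeA n s.toList)

-- ===== PORT B =====
-- Source B's per-iteration body: branch on the code point's range, pure arithmetic, one output char.
def encodeCharB (n : Int) (c : Char) : Char :=
  let o : Int := (c.toNat : Int)
  if 65 ≤ o ∧ o ≤ 90 then Char.ofNat (65 + PySem.Int.mod (o - 65 + n) 26).toNat
  else if 97 ≤ o ∧ o ≤ 122 then Char.ofNat (97 + PySem.Int.mod (o - 97 + n) 26).toNat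
  else if 48 ≤ o ∧ o ≤ 57 then Char.ofNat (48 + PySem.Int.mod (o - 48 + n) 10).toNat
  else c

-- Source B's loop: fold over the characters, appending each transformed char to the accumulator.
def complex_encode_alt (s : String) (n : Int) : String :=
  String.mk (s.toList.foldl (fun acc c => acc ++ [encodeCharB n c]) [])

-- ===== PRECONDITION & SPEC =====
def Spec_complex_encode (s : String) (n : Int) (out : String) : Prop := out = complex_encode_alt s n
instance (s : String) (n : Int) (out : String) : Decidable (Spec_complex_encode s n out) := by unfold Spec_complex_encode; infer_instance

-- ===== CLAIM =====
def Claim_equal_complex_encode : Prop := ∀ (s : String) (n : Int), Dom_complex_encode s n → Spec_complex_encode s n (complex_encode s n)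

-- ===== LEMMAS AND PROOFS =====
lemma isupper_eq (c : Char) : PySem.Chars.isupper c = decide (65 ≤ c.toNat ∧ c.toNat ≤ 90) := by
  rw [Bool.eq_iff_iff]
  simp only [PySem.Chars.isupper, Char.le_def, UInt32.le_iff_toNat_le, Char.toNat_val,
    Bool.and_eq_true, decide_eq_true_eq]
  exact Iff.rfl

lemma islower_eq (c : Char) : PySem.Chars.islower c = decide (97 ≤ c.toNat ∧ c.toNat ≤ 122) := by
  rw [Bool.eq_iff_iff]
  simp only [PySem.Chars.islower, Char.le_def, UInt32.le_iff_toNat_le, Char.toNat_val,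
    Bool.and_eq_true, decide_eq_true_eq]
  exact Iff.rfl

lemma isdigit_eq (c : Char) : PySem.Chars.isdigit c = decide (48 ≤ c.toNat ∧ c.toNat ≤ 57) := by
  rw [Bool.eq_iff_iff]
  simp only [PySem.Chars.isdigit, Char.le_def, UInt32.le_iff_toNat_le, Char.toNat_val,
    Bool.and_eq_true, decide_eq_true_eq]
  exact Iff.rfl

lemma toChars_digit (r : Int) (h0 : 0 ≤ r) (h1 : r < 10) :
    PySem.Int.toChars r = [Char.ofNat (48 + r).toNat] := by
  interval_cases r <;> decide

lemma piece_eq (n : Int) (c : Char) :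
    (if PySem.Chars.isalpha c then
        let off : Int := if PySem.Chars.isupper c then 65 else 97
        [Char.ofNat ((PySem.Int.mod ((c.toNat : Int) - off + n) 26) + off).toNat]
      else if PySem.Chars.isdigit c then
        PySem.Int.toChars (PySem.Int.mod (((c.toNat : Int) - 48) + n) 10)
      else [c]) = [encodeCharB n c] := by
  simp only [PySem.Chars.isalpha, isupper_eq c, islower_eq c, isdigit_eq c, encodeCharB]
  by_cases hu : 65 ≤ c.toNat ∧ c.toNat ≤ 90
  · have h1 : (65 : Int) ≤ (c.toNat : Int) ∧ (c.toNat : Int) ≤ 90 := by exact_mod_cast hu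
    simp [hu, h1, Int.add_comm]
  · by_cases hl : 97 ≤ c.toNat ∧ c.toNat ≤ 122
    · have h1 : (97 : Int) ≤ (c.toNat : Int) ∧ (c.toNat : Int) ≤ 122 := by exact_mod_cast hl
      simp [hu, hl, h1, Int.add_comm]
    · by_cases hd : 48 ≤ c.toNat ∧ c.toNat ≤ 57
      · have h1 : (48 : Int) ≤ (c.toNat : Int) ∧ (c.toNat : Int) ≤ 57 := by exact_mod_cast hd
        simp [hu, hl, hd, h1]
        exact toChars_digit _ (Int.emod_nonneg _ (by norm_num)) (Int.emod_lt_of_pos _ (by norm_num))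
      · simp [hu, hl, hd]

lemma complexEncodeA_eq_map (n : Int) (cs : List Char) :
    complexEncodeA n cs = cs.map (encodeCharB n) := by
  induction cs with
  | nil => rfl
  | cons c rest ih =>
    simpa [complexEncodeA, ih] using
      congrArg (· ++ rest.map (encodeCharB n)) (piece_eq n c)

lemma foldl_append_singleton (f : Char → Char) (cs acc : List Char) :
    cs.foldl (fun a c => a ++ [f c]) acc = acc ++ cs.map f := by
  induction cs generalizing acc with
  | nil => simp
  | cons c rest ih => simp [List.foldl, ih]

-- ===== VERDICT =====
theorem complex_encode_spec : Claim_equal_complex_encode := by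
  intro s n _
  unfold Spec_complex_encode complex_encode complex_encode_alt
  rw [complexEncodeA_eq_map, foldl_append_singleton]
  simp
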